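-- pv_equiv track=rewrite | github.com/softlab-unimore/crew | adapters.py | _wordpieces_to_words_adapt
-- ===== SOURCE A (Python) =====
-- def _wordpieces_to_words_adapt(wps: list[str], attrs_mask: list[int]):
--     words_ = []
--     attrs_mask_ = []
--     w = wps[0]
--     a = attrs_mask[0]
--     for i in range(1, len(wps)):
--         if wps[i].startswith('##'):
--             # append to current word
--             w += wps[i].replace('##', '')
--         else:
--             words_.append(w)
--             attrs_mask_.append(a)
--             # initialize new word
--             w = wps[i]
--             a = attrs_mask[i]
--     words_.append(w)
--     attrs_mask_.append(a)
--     return words_, attrs_mask_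
-- ===== SOURCE B (Python) =====
-- def _wordpieces_to_words_adapt(wps: list[str], attrs_mask: list[int]):
--     # Segment-at-a-time: an outer loop starts a word at index s and an inner
--     # scan greedily consumes its '##' continuation pieces, instead of A's
--     # single pass with a running word flushed at boundaries.
--     words_ = []
--     attrs_mask_ = []
--     n = len(wps)
--     s = 0
--     while True:
--         w = wps[s]
--         k = s + 1
--         while k < n and wps[k].startswith('##'):
--             w += wps[k].replace('##', '')
--             k += 1
--         words_.append(w)
--         attrs_mask_.append(attrs_mask[s])
--         if k == n:
--             return words_, attrs_mask_
--         s = k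
-- ===== Notes on version B (the rewrite author's own statement) =====
-- stated objective: alternative
-- what changed: A's single pass that carries a running word/attribute and flushes them at each boundary is replaced by a segment-at-a-time decomposition: an outer loop starts a word at each start index and an inner greedy scan consumes its '##' continuation pieces before the word is emitted.
import Mathlib
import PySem

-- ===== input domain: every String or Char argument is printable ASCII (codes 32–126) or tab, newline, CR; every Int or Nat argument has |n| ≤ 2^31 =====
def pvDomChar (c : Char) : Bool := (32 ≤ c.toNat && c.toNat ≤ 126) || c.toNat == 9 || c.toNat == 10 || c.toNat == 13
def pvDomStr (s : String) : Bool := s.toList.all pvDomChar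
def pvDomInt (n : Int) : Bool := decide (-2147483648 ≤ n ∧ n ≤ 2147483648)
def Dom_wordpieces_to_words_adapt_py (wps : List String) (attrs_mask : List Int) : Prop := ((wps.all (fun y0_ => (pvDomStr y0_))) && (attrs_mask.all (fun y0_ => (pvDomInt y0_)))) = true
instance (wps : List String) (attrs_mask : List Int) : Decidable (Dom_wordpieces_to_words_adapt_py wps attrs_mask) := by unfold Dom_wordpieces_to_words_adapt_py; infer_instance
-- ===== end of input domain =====

-- B re-decomposes A's single running-word pass into an outer per-word loop with an inner
-- greedy scan over '##' continuation pieces (objective: alternative decomposition, same cost).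

-- ===== PORT A =====
-- loop body of A's 'for i in range(1, len(wps))'; state = (words_, attrs_mask_, w, a).
-- wps[i] is always in range here; attrs_mask[i] raises IndexError when i ≥ len(attrs_mask)
-- (those inputs are excluded by Pre_, where getD never defaults).
def pvStepA (wps : List String) (attrs_mask : List Int)
    (st : List String × List Int × String × Int) (i : Nat) :
    List String × List Int × String × Int :=
  let p := wps.getD i ""
  if PySem.Str.startswith p "##" then
    (st.1, st.2.1, st.2.2.1 ++ PySem.Str.replace p "##" "", st.2.2.2)
  else
    (st.1 ++ [st.2.2.1], st.2.1 ++ [st.2.2.2], p, attrs_mask.getD i 0)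

def wordpieces_to_words_adapt_py (wps : List String) (attrs_mask : List Int) : List String × List Int :=
  -- wps[0] / attrs_mask[0] raise IndexError on an empty list (excluded by Pre_; getD is exact elsewhere)
  let w0 := wps.getD 0 ""
  let a0 := attrs_mask.getD 0 0
  let st := (List.range' 1 (wps.length - 1)).foldl (pvStepA wps attrs_mask) ([], [], w0, a0)
  (st.1 ++ [st.2.2.1], st.2.1 ++ [st.2.2.2])

-- ===== PORT B =====
-- inner 'while k < n and wps[k].startswith("##")' loop of Source B; the fuel argument
-- (wps.length - k at the call site in pvGrab) only makes the recursion structural: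
-- k grows by 1 per iteration, so the 0-fuel branch is never reached and each step
-- is exactly the Python loop body.
def pvGrabF (wps : List String) : Nat → String → Nat → String × Nat
  | 0, w, k => (w, k)
  | fuel + 1, w, k =>
    if k < wps.length ∧ PySem.Str.startswith (wps.getD k "") "##" = true then
      pvGrabF wps fuel (w ++ PySem.Str.replace (wps.getD k "") "##" "") (k + 1)
    else (w, k)

def pvGrab (wps : List String) (w : String) (k : Nat) : String × Nat :=
  pvGrabF wps (wps.length - k) w k

-- outer 'while True' loop of Source B over word-start indices s; fuel likewise (s strictly
-- increases each iteration).  The 's < wps.length' test only makes the recursion total: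
-- in Python, wps[s] raises IndexError on empty wps (excluded by Pre_), otherwise
-- s < wps.length always holds on entry.
def pvOuterF (wps : List String) (attrs_mask : List Int) :
    Nat → Nat → List String → List Int → List String × List Int
  | 0, _, words, amask => (words, amask)
  | fuel + 1, s, words, amask =>
    if s < wps.length then
      let g := pvGrab wps (wps.getD s "") (s + 1)
      let words' := words ++ [g.1]
      let amask' := amask ++ [attrs_mask.getD s 0]  -- attrs_mask[s] raises when out of range (excluded by Pre_)
      if g.2 = wps.length then (words', amask')
      else pvOuterF wps attrs_mask fuel g.2 words' amask'
    else (words, amask)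

def pvOuter (wps : List String) (attrs_mask : List Int) (s : Nat)
    (words : List String) (amask : List Int) : List String × List Int :=
  pvOuterF wps attrs_mask (wps.length - s) s words amask

def wordpieces_to_words_adapt_py_alt (wps : List String) (attrs_mask : List Int) : List String × List Int :=
  pvOuter wps attrs_mask 0 [] []

-- ===== PRECONDITION & SPEC =====
-- Pre_ excludes exactly the inputs where Python A raises IndexError: empty wps or attrs_mask
-- (wps[0]/attrs_mask[0]), and any word-start index i with attrs_mask[i] out of range.
def Pre_wordpieces_to_words_adapt_py (wps : List String) (attrs_mask : List Int) : Prop :=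
  wps ≠ [] ∧ attrs_mask ≠ [] ∧
  ∀ i ∈ List.range' 1 (wps.length - 1),
    ¬ (PySem.Str.startswith (wps.getD i "") "##" = true) → i < attrs_mask.length

instance (wps : List String) (attrs_mask : List Int) : Decidable (Pre_wordpieces_to_words_adapt_py wps attrs_mask) := by
  unfold Pre_wordpieces_to_words_adapt_py; infer_instance

def pvWitness_wordpieces_to_words_adapt_py : List String × List Int :=
  (["ab", "##cd", "ef"], [1, 2, 3])

def Spec_wordpieces_to_words_adapt_py (wps : List String) (attrs_mask : List Int) (out : List String × List Int) : Prop := out = wordpieces_to_words_adapt_py_alt wps attrs_mask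
instance (wps : List String) (attrs_mask : List Int) (out : List String × List Int) : Decidable (Spec_wordpieces_to_words_adapt_py wps attrs_mask out) := by unfold Spec_wordpieces_to_words_adapt_py; infer_instance

-- ===== CLAIM (what is proved, stated in full; the proofs are below) =====
def Claim_equal_wordpieces_to_words_adapt_py : Prop := ∀ (wps : List String) (attrs_mask : List Int), Dom_wordpieces_to_words_adapt_py wps attrs_mask → Pre_wordpieces_to_words_adapt_py wps attrs_mask → Spec_wordpieces_to_words_adapt_py wps attrs_mask (wordpieces_to_words_adapt_py wps attrs_mask)

-- ===== LEMMAS AND PROOFS =====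

-- the inner scan never moves k backwards
theorem pvGrabF_ge (wps : List String) : ∀ (f : Nat) (w : String) (k : Nat), k ≤ (pvGrabF wps f w k).2 := by
  intro f
  induction f with
  | zero => intro w k; simp [pvGrabF]
  | succ f ih =>
    intro w k
    simp only [pvGrabF]
    split
    · exact Nat.le_trans (Nat.le_succ k) (ih _ _)
    · exact Nat.le_refl k

theorem pvGrab_ge (wps : List String) (w : String) (k : Nat) : k ≤ (pvGrab wps w k).2 :=
  pvGrabF_ge wps _ w k

-- one step of the inner scan on a continuation piece
theorem pvGrab_cont (wps : List String) (w : String) (k : Nat)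
    (hlt : k < wps.length) (hpp : PySem.Str.startswith (wps.getD k "") "##" = true) :
    pvGrab wps w k = pvGrab wps (w ++ PySem.Str.replace (wps.getD k "") "##" "") (k + 1) := by
  have hm : wps.length - k = (wps.length - (k + 1)) + 1 := by omega
  unfold pvGrab
  rw [hm]
  simp only [pvGrabF]
  rw [if_pos ⟨hlt, hpp⟩]

-- the inner scan stops at a word boundary (or at the end of wps)
theorem pvGrab_stop (wps : List String) (w : String) (k : Nat)
    (h : ¬(k < wps.length ∧ PySem.Str.startswith (wps.getD k "") "##" = true)) :
    pvGrab wps w k = (w, k) := by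
  unfold pvGrab
  cases e : wps.length - k with
  | zero => rfl
  | succ f => simp only [pvGrabF]; rw [if_neg h]

-- any fuel at least wps.length - s computes the same outer loop
theorem pvOuterF_fuel (wps : List String) (attrs_mask : List Int) :
    ∀ (f s : Nat) (words : List String) (amask : List Int), wps.length - s ≤ f →
      pvOuterF wps attrs_mask f s words amask
        = pvOuterF wps attrs_mask (wps.length - s) s words amask := by
  intro f
  induction f using Nat.strong_induction_on with
  | _ f ih =>
    intro s words amask hf
    cases f with
    | zero =>
      have h0 : wps.length - s = 0 := by omega
      rw [h0]
    | succ f' =>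
      by_cases hs : s < wps.length
      · have hm : wps.length - s = (wps.length - (s + 1)) + 1 := by omega
        rw [hm]
        simp only [pvOuterF]
        rw [if_pos hs, if_pos hs]
        have hge : s + 1 ≤ (pvGrab wps (wps.getD s "") (s + 1)).2 := pvGrab_ge wps _ _
        split
        · rfl
        · rw [ih f' (by omega) _ _ _ (by omega),
              ih (wps.length - (s + 1)) (by omega) _ _ _ (by omega)]
      · have h0 : wps.length - s = 0 := by omega
        rw [h0]
        simp only [pvOuterF]
        rw [if_neg hs]

-- one iteration of the outer loop
theorem pvOuter_step (wps : List String) (attrs_mask : List Int) (s : Nat)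
    (words : List String) (amask : List Int) (hs : s < wps.length) :
    pvOuter wps attrs_mask s words amask =
      (if (pvGrab wps (wps.getD s "") (s + 1)).2 = wps.length
       then (words ++ [(pvGrab wps (wps.getD s "") (s + 1)).1], amask ++ [attrs_mask.getD s 0])
       else pvOuter wps attrs_mask (pvGrab wps (wps.getD s "") (s + 1)).2
              (words ++ [(pvGrab wps (wps.getD s "") (s + 1)).1]) (amask ++ [attrs_mask.getD s 0])) := by
  have hm : wps.length - s = (wps.length - (s + 1)) + 1 := by omega
  unfold pvOuter
  rw [hm]
  simp only [pvOuterF]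
  rw [if_pos hs]
  have hge : s + 1 ≤ (pvGrab wps (wps.getD s "") (s + 1)).2 := pvGrab_ge wps _ _
  split
  · rfl
  · exact pvOuterF_fuel wps attrs_mask (wps.length - (s + 1)) _ _ _ (by omega)

-- A's fold from position j onward, with the current word (w, a) open, equals B's
-- inner-scan-then-recurse continuation started at j.
theorem pvMain (wps : List String) (attrs_mask : List Int) :
    ∀ (m j : Nat), m = wps.length - j → 1 ≤ j → j ≤ wps.length →
    ∀ (ws : List String) (as_ : List Int) (w : String) (a : Int),
    ((((List.range' j (wps.length - j)).foldl (pvStepA wps attrs_mask) (ws, as_, w, a)).1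
        ++ [((List.range' j (wps.length - j)).foldl (pvStepA wps attrs_mask) (ws, as_, w, a)).2.2.1],
      ((List.range' j (wps.length - j)).foldl (pvStepA wps attrs_mask) (ws, as_, w, a)).2.1
        ++ [((List.range' j (wps.length - j)).foldl (pvStepA wps attrs_mask) (ws, as_, w, a)).2.2.2]))
    = (if (pvGrab wps w j).2 = wps.length
       then (ws ++ [(pvGrab wps w j).1], as_ ++ [a])
       else pvOuter wps attrs_mask (pvGrab wps w j).2 (ws ++ [(pvGrab wps w j).1]) (as_ ++ [a])) := by
  intro m
  induction m using Nat.strong_induction_on with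
  | _ m ih =>
    intro j hm hj1 hjn ws as_ w a
    rcases Nat.lt_or_ge j wps.length with hlt | hge
    · -- j < wps.length : one loop step, then the induction hypothesis at j+1
      have hrange : wps.length - j = (wps.length - (j + 1)) + 1 := by omega
      rw [hrange, List.range'_succ, List.foldl_cons]
      by_cases hpp : PySem.Str.startswith (wps.getD j "") "##" = true
      · -- continuation piece: both sides grow the same word
        have hstep : pvStepA wps attrs_mask (ws, as_, w, a) j
            = (ws, as_, w ++ PySem.Str.replace (wps.getD j "") "##" "", a) := by
          simp only [pvStepA]; rw [if_pos hpp]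
        rw [hstep, ih (wps.length - (j + 1)) (by omega) (j + 1) rfl (by omega) (by omega)]
        rw [pvGrab_cont wps w j hlt hpp]
      · -- word boundary: A flushes (w, a); B's inner scan stops at j, pvOuter opens the next segment
        have hstep : pvStepA wps attrs_mask (ws, as_, w, a) j
            = (ws ++ [w], as_ ++ [a], wps.getD j "", attrs_mask.getD j 0) := by
          simp only [pvStepA]; rw [if_neg hpp]
        rw [hstep, ih (wps.length - (j + 1)) (by omega) (j + 1) rfl (by omega) (by omega)]
        have hstop := pvGrab_stop wps w j (fun hc => hpp hc.2)
        have hg1 : (pvGrab wps w j).1 = w := by rw [hstop]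
        have hg2 : (pvGrab wps w j).2 = j := by rw [hstop]
        rw [hg1, hg2, if_neg (show ¬ j = wps.length by omega)]
        rw [pvOuter_step wps attrs_mask j (ws ++ [w]) (as_ ++ [a]) hlt]
    · -- j = wps.length : empty range, the inner scan stops immediately
      have hj : j = wps.length := by omega
      have h0 : wps.length - j = 0 := by omega
      have hstop := pvGrab_stop wps w j (fun hc => absurd hc.1 (by omega))
      have hg1 : (pvGrab wps w j).1 = w := by rw [hstop]
      have hg2 : (pvGrab wps w j).2 = j := by rw [hstop]
      rw [h0, List.range'_zero, List.foldl_nil, hg1, hg2, if_pos hj]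

theorem wordpieces_to_words_adapt_py_spec_aux (wps : List String) (attrs_mask : List Int)
    (hne : wps ≠ []) :
    wordpieces_to_words_adapt_py wps attrs_mask = wordpieces_to_words_adapt_py_alt wps attrs_mask := by
  have hn : 1 ≤ wps.length := by
    cases wps with
    | nil => exact absurd rfl hne
    | cons x xs => simp
  have h := pvMain wps attrs_mask (wps.length - 1) 1 rfl le_rfl hn [] []
    (wps.getD 0 "") (attrs_mask.getD 0 0)
  unfold wordpieces_to_words_adapt_py wordpieces_to_words_adapt_py_alt
  rw [h, pvOuter_step wps attrs_mask 0 [] [] (by omega)]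

-- ===== VERDICT (by name: the statement is the Claim_ definition above) =====
theorem wordpieces_to_words_adapt_py_spec : Claim_equal_wordpieces_to_words_adapt_py := by
  intro wps attrs_mask _hdom hpre
  unfold Spec_wordpieces_to_words_adapt_py
  exact (wordpieces_to_words_adapt_py_spec_aux wps attrs_mask hpre.1).symm ▸ rfl
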